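-- pv_equiv track=rewrite | github.com/charlesXu86/Chatbot_CN | Chatbot_Model/Text_Generator/BiLingual_Evaluation_Understudy.py | sum_clip_counts
-- ===== SOURCE A (Python) =====
-- def sum_clip_counts(dict_cand, list_dict_refs):
--     sum = 0
--     for word in dict_cand:
--         max_count_word_occurrences = 0
--
--         for dict_ref in list_dict_refs:
--             if word in dict_ref:
--                 count_word_occurrences = min(dict_cand[word], dict_ref[word])
--                 if count_word_occurrences > max_count_word_occurrences:
--                     max_count_word_occurrences = count_word_occurrences
--
--         sum += max_count_word_occurrences
--
--     return sum
-- ===== SOURCE B (Python) =====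
-- def sum_clip_counts(dict_cand, list_dict_refs):
--     best = {}
--     for dict_ref in list_dict_refs:
--         for word, cnt in dict_ref.items():
--             best[word] = max(best.get(word, cnt), cnt)
--     total = 0
--     for word, cnt in dict_cand.items():
--         total += max(0, min(cnt, best.get(word, 0)))
--     return total
-- ===== Notes on version B (the rewrite author's own statement) =====
-- stated objective: faster
-- what changed: Replaces the nested loop (for each candidate word scan every reference dict) by building one dict of per-word maximum reference counts in a single pass over the references, then a single flat pass over the candidate dict summing max(0, min(cnt, best)), using that max over refs of min(c, r) = min(c, max r).
import Mathlib
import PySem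

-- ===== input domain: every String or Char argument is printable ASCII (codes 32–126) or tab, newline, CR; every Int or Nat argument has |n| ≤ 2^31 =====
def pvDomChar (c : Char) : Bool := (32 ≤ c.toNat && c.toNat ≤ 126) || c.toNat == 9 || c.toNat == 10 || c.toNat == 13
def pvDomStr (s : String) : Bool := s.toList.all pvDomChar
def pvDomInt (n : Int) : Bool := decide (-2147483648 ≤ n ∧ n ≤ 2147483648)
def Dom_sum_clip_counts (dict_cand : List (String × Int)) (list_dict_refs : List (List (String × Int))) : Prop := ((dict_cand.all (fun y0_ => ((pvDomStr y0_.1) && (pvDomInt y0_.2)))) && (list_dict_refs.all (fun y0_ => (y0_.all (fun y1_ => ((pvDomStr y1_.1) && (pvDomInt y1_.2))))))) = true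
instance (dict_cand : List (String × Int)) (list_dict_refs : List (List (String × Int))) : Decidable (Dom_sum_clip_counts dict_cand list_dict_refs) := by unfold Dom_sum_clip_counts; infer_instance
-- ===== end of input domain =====

-- B replaces A's nested candidate×reference scan by one pass building a dict of per-word maximum
-- reference counts followed by one flat pass over the candidate dict (objective: faster).


-- ===== PORT A =====
-- for word in dict_cand: inner scan over list_dict_refs keeping the max clipped count, accumulated into sum
def sum_clip_counts (dict_cand : List (String × Int)) (list_dict_refs : List (List (String × Int))) : Int :=
  (PySem.Dict.ofList dict_cand).keys.foldl (fun s word =>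
    s + (list_dict_refs.map PySem.Dict.ofList).foldl (fun m dict_ref =>
          if dict_ref.contains word then
            if min ((PySem.Dict.ofList dict_cand).getD word 0) (dict_ref.getD word 0) > m then
              min ((PySem.Dict.ofList dict_cand).getD word 0) (dict_ref.getD word 0)
            else m
          else m) 0) 0

-- ===== PORT B =====
-- best[word] = max reference count across all refs; then one pass over the candidate items
def sum_clip_counts_alt (dict_cand : List (String × Int)) (list_dict_refs : List (List (String × Int))) : Int :=
  (PySem.Dict.ofList dict_cand).items.foldl
    (fun s p => s + max 0 (min p.2
      ((list_dict_refs.foldl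
          (fun b ref => (PySem.Dict.ofList ref).items.foldl
              (fun b q => b.insert q.1 (max (b.getD q.1 q.2) q.2)) b)
          PySem.Dict.empty).getD p.1 0))) 0

-- ===== PRECONDITION & SPEC =====
def Spec_sum_clip_counts (dict_cand : List (String × Int)) (list_dict_refs : List (List (String × Int))) (out : Int) : Prop := out = sum_clip_counts_alt dict_cand list_dict_refs
instance (dict_cand : List (String × Int)) (list_dict_refs : List (List (String × Int))) (out : Int) : Decidable (Spec_sum_clip_counts dict_cand list_dict_refs out) := by unfold Spec_sum_clip_counts; infer_instance

-- ===== CLAIM (what is proved, stated in full; the proofs are below) =====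
def Claim_equal_sum_clip_counts : Prop := ∀ (dict_cand : List (String × Int)) (list_dict_refs : List (List (String × Int))), Dom_sum_clip_counts dict_cand list_dict_refs → Spec_sum_clip_counts dict_cand list_dict_refs (sum_clip_counts dict_cand list_dict_refs)

-- ===== LEMMAS AND PROOFS =====

-- B's inner loop over one reference's items, seen through get?: combine with max where the ref has the key
theorem pvInner (l : List (String × Int)) : ∀ (b : PySem.Dict String Int) (w : String),
    (l.map Prod.fst).Nodup →
    (l.foldl (fun b q => b.insert q.1 (max (b.getD q.1 q.2) q.2)) b).get? w
      = match (PySem.Dict.mk l).get? w with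
        | none => b.get? w
        | some v => some ((b.get? w).elim v (fun m => max m v)) := by
  induction l with
  | nil => intro b w _; simp [PySem.Dict.get?]
  | cons p t ih =>
    intro b w hnd
    simp only [List.map_cons, List.nodup_cons] at hnd
    rw [List.foldl_cons, ih _ w hnd.2, PySem.Dict.get?_mk_cons]
    by_cases hw : p.1 = w
    · subst hw
      have ht : (PySem.Dict.mk t).get? p.1 = none := by
        rw [PySem.Dict.get?_eq_none_iff_not_mem_keys]
        simpa using hnd.1
      rw [ht]
      simp [PySem.Dict.get?_insert_self, PySem.Dict.getD_eq_get?_getD]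
      cases hb : b.get? p.1 <;> simp
    · have hw' : w ≠ p.1 := fun h => hw h.symm
      simp [PySem.Dict.get?_insert, hw', hw]

-- B's outer loop over all references, seen through get?
theorem pvOuter (refs : List (List (String × Int))) : ∀ (b : PySem.Dict String Int) (w : String),
    (refs.foldl (fun b ref => (PySem.Dict.ofList ref).items.foldl
        (fun b q => b.insert q.1 (max (b.getD q.1 q.2) q.2)) b) b).get? w
      = refs.foldl (fun o ref => match (PySem.Dict.ofList ref).get? w with
          | none => o
          | some v => some (o.elim v (fun m => max m v))) (b.get? w) := by
  induction refs with
  | nil => intro b w; rfl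
  | cons r t ih =>
    intro b w
    rw [List.foldl_cons, List.foldl_cons, ih]
    congr 1
    have hnd : ((PySem.Dict.ofList (κ := String) (ν := Int) r).items.map Prod.fst).Nodup := by
      have := PySem.Dict.nodup_keys_ofList (κ := String) (ν := Int) r
      simpa [PySem.Dict.keys] using this
    have h := pvInner (PySem.Dict.ofList r).items b w hnd
    rw [h]

-- A's inner max-scan from a combined accumulator equals combining after B's option fold
theorem pvG (c : Int) (w : String) (m : Int) (refs : List (PySem.Dict String Int)) :
    ∀ (o : Option Int),
    refs.foldl (fun m r =>
        if r.contains w then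
          if min c (r.getD w 0) > m then min c (r.getD w 0) else m
        else m)
      (o.elim m (fun v => max m (min c v)))
      = (refs.foldl (fun o r => match r.get? w with
          | none => o
          | some v => some (o.elim v (fun m => max m v))) o).elim m (fun v => max m (min c v)) := by
  induction refs with
  | nil => intro o; rfl
  | cons r t ih =>
    intro o
    rw [List.foldl_cons, List.foldl_cons]
    have hstep : (if r.contains w then
          (if min c (r.getD w 0) > (o.elim m (fun v => max m (min c v))) then min c (r.getD w 0)
           else (o.elim m (fun v => max m (min c v))))
        else (o.elim m (fun v => max m (min c v))))
        = ((match r.get? w with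
          | none => o
          | some v => some (o.elim v (fun m => max m v))) : Option Int).elim m (fun v => max m (min c v)) := by
      cases hg : r.get? w with
      | none =>
        have hc : r.contains w = false := by rw [PySem.Dict.contains_eq_isSome_get?, hg]; rfl
        simp [hc]
      | some rv =>
        have hc : r.contains w = true := by rw [PySem.Dict.contains_eq_isSome_get?, hg]; rfl
        have hd : r.getD w 0 = rv := by rw [PySem.Dict.getD_eq_get?_getD, hg]; rfl
        cases o with
        | none => simp only [hc, if_true, hd, Option.elim]; split_ifs <;> omega
        | some v => simp only [hc, if_true, hd, Option.elim]; split_ifs <;> omega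
    rw [hstep, ih]

-- ===== VERDICT (by name: the statement is the Claim_ definition above) =====
theorem sum_clip_counts_spec : Claim_equal_sum_clip_counts := by
  intro dict_cand list_dict_refs _
  unfold Spec_sum_clip_counts sum_clip_counts sum_clip_counts_alt
  have hnd : (PySem.Dict.ofList (κ := String) (ν := Int) dict_cand).keys.Nodup :=
    PySem.Dict.nodup_keys_ofList dict_cand
  rw [PySem.Dict.items_eq_map_keys _ hnd 0, List.foldl_map]
  congr 1
  funext s word
  congr 1
  -- per-key equality: A's scan over the refs = B's clipped lookup in best
  have hG := pvG ((PySem.Dict.ofList dict_cand).getD word 0) word 0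
    (list_dict_refs.map PySem.Dict.ofList) none
  simp only [Option.elim_none] at hG
  rw [hG]
  simp only [List.foldl_map]
  have hOD : (list_dict_refs.foldl
      (fun b ref => (PySem.Dict.ofList ref).items.foldl
          (fun b q => b.insert q.1 (max (b.getD q.1 q.2) q.2)) b)
      (PySem.Dict.empty (κ := String) (ν := Int))).getD word 0
      = (list_dict_refs.foldl (fun o ref => match (PySem.Dict.ofList ref).get? word with
          | none => o
          | some v => some (o.elim v (fun m => max m v))) (none : Option Int)).getD 0 := by
    rw [PySem.Dict.getD_eq_get?_getD, pvOuter list_dict_refs PySem.Dict.empty word,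
      PySem.Dict.get?_empty]
  rw [hOD]
  cases hzz : list_dict_refs.foldl (fun o ref => match (PySem.Dict.ofList ref).get? word with
      | none => o
      | some v => some (o.elim v (fun m => max m v))) (none : Option Int) <;>
    simp [Option.elim]
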